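-- pv_equiv track=rewrite | github.com/view2future/inkGrid | backend/app/services/grid_service.py | _interpolate_lines
-- ===== SOURCE A (Python) =====
-- def _interpolate_lines(lines, total_dim, target_count):
--     """在线之间插入额外的线以达到目标数量"""
--     lines = sorted(set(lines))
--
--     while len(lines) < target_count:
--         # 找到最大的间隔
--         gaps = [(lines[i + 1] - lines[i], i) for i in range(len(lines) - 1)]
--         gaps.sort(reverse=True)
--
--         if not gaps or gaps[0][0] < 20:
--             break
--
--         # 在最大间隔中间插入新线
--         max_gap, idx = gaps[0]
--         new_line = (lines[idx] + lines[idx + 1]) // 2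
--         lines.append(new_line)
--         lines.sort()
--
--     return lines
-- ===== SOURCE B (Python) =====
-- def _insert_sorted(lst, item):
--     """Ordered insert into an ascending list (hand-rolled insort)."""
--     out = []
--     k = 0
--     while k < len(lst) and lst[k] < item:
--         out.append(lst[k])
--         k += 1
--     out.append(item)
--     out.extend(lst[k:])
--     return out
--
--
-- def _interpolate_lines(lines, total_dim, target_count):
--     """Split-gap queue: build the (negated-key) gap list once, keep it ordered
--     across all iterations, pop the best gap from the front and binary-split it,
--     re-inserting its two halves; points are assembled and sorted once at the end
--     (no per-iteration gap rebuild or point re-sort)."""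
--     pts = sorted(set(lines))
--     gaps = sorted((-(pts[i + 1] - pts[i]), -pts[i]) for i in range(len(pts) - 1))
--     mids = []
--     while len(pts) + len(mids) < target_count and gaps:
--         g, l = -gaps[0][0], -gaps[0][1]
--         if g < 20:
--             break
--         gaps = gaps[1:]
--         mid = (l + (l + g)) // 2
--         mids.append(mid)
--         gaps = _insert_sorted(gaps, (-(mid - l), -l))
--         gaps = _insert_sorted(gaps, (-(l + g - mid), -mid))
--     return sorted(pts + mids)
-- ===== Notes on version B (the rewrite author's own statement) =====
-- stated objective: alternative
-- what changed: Instead of rebuilding and reverse-sorting the whole gap list and re-sorting the point list on every iteration, B builds a negated-key gap queue once, keeps it ordered across iterations (pop the best gap from the front, binary-split it, ordered-insert the two halves), and assembles and sorts the output points a single time at the end.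
import Mathlib
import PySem

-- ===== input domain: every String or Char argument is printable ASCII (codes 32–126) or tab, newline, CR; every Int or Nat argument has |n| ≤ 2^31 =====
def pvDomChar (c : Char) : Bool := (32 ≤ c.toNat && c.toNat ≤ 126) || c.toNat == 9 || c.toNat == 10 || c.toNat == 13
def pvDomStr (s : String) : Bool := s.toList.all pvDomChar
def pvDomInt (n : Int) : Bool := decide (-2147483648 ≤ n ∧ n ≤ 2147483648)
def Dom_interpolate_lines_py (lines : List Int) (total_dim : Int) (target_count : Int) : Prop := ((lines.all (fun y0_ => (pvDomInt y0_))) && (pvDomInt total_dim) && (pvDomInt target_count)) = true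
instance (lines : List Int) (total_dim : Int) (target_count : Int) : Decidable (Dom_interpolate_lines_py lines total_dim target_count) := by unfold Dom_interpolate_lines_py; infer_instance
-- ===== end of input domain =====

-- B replaces A's rebuild-the-gap-list-and-sort-twice-per-iteration loop by a gap queue built
-- once and kept ordered across iterations (pop best gap, binary-split it, re-insert the two
-- halves); the output points are assembled and sorted once at the end (objective: alternative).

-- ===== PORT A =====
-- gaps = [(lines[i+1] - lines[i], i) for i in range(len(lines) - 1)]  (indices are in range, so pyGetD is exact)
def aGaps (pts : List Int) : List (Int × Int) :=
  (PySem.List.pyRange 0 (PySem.List.len pts - 1) 1).map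
    (fun i => (PySem.List.pyGetD pts (i + 1) 0 - PySem.List.pyGetD pts i 0, i))

-- the while-loop of A; measure: each iteration appends one element
def aLoop (target_count : Int) (pts : List Int) : List Int :=
  if PySem.List.len pts < target_count then
    match PySem.List.sorted2 (aGaps pts) Prod.fst Prod.snd true with
    | [] => pts
    | (g, idx) :: _ =>
      if g < 20 then pts
      else aLoop target_count
        (PySem.List.sorted
          (pts ++ [PySem.Int.floordiv (PySem.List.pyGetD pts idx 0 + PySem.List.pyGetD pts (idx + 1) 0) 2])
          (fun x => x))
  else pts
termination_by (target_count - PySem.List.len pts).toNat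
decreasing_by
  simp only [PySem.List.len_eq, PySem.List.length_sorted, List.length_append, List.length_cons,
    List.length_nil] at *
  omega

def interpolate_lines_py (lines : List Int) (total_dim : Int) (target_count : Int) : List Int :=
  aLoop target_count (PySem.List.sorted (PySem.Set.ofList lines) (fun x => x))

-- ===== PORT B =====
-- _insert_sorted(lst, item): ordered insert into an ascending list (tuple '<' is lexicographic)
def insSorted (lst : List (Int × Int)) (item : Int × Int) : List (Int × Int) :=
  match lst with
  | [] => [item]
  | x :: xs =>
    if x.1 < item.1 ∨ (x.1 = item.1 ∧ x.2 < item.2) then x :: insSorted xs item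
    else item :: x :: xs

-- gaps = sorted((-(pts[i+1] - pts[i]), -pts[i]) for i in range(len(pts) - 1))
def bGaps0 (pts : List Int) : List (Int × Int) :=
  PySem.List.sorted2
    ((PySem.List.pyRange 0 (PySem.List.len pts - 1) 1).map
      (fun i => (-(PySem.List.pyGetD pts (i + 1) 0 - PySem.List.pyGetD pts i 0),
                 -(PySem.List.pyGetD pts i 0))))
    Prod.fst Prod.snd false

-- the while-loop of B: npts = len(pts) is fixed, mids accumulates, gaps is the ordered queue
def bLoop (target_count npts : Int) (mids : List Int) (gaps : List (Int × Int)) : List Int :=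
  if npts + PySem.List.len mids < target_count then
    match gaps with
    | [] => mids
    | (ng, nl) :: rest =>
      let g := -ng
      let l := -nl
      if g < 20 then mids
      else
        let mid := PySem.Int.floordiv (l + (l + g)) 2
        bLoop target_count npts (mids ++ [mid])
          (insSorted (insSorted rest (-(mid - l), -l)) (-(l + g - mid), -mid))
  else mids
termination_by (target_count - (npts + PySem.List.len mids)).toNat
decreasing_by
  simp only [PySem.List.len_eq, List.length_append, List.length_cons, List.length_nil] at *
  omega

def interpolate_lines_py_alt (lines : List Int) (total_dim : Int) (target_count : Int) : List Int :=
  let pts := PySem.List.sorted (PySem.Set.ofList lines) (fun x => x)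
  PySem.List.sorted (pts ++ bLoop target_count (PySem.List.len pts) [] (bGaps0 pts)) (fun x => x)

-- ===== PRECONDITION & SPEC =====
def Spec_interpolate_lines_py (lines : List Int) (total_dim : Int) (target_count : Int) (out : List Int) : Prop := out = interpolate_lines_py_alt lines total_dim target_count
instance (lines : List Int) (total_dim : Int) (target_count : Int) (out : List Int) : Decidable (Spec_interpolate_lines_py lines total_dim target_count out) := by unfold Spec_interpolate_lines_py; infer_instance

-- ===== CLAIM (what is proved, stated in full; the proofs are below) =====
def Claim_equal_interpolate_lines_py : Prop := ∀ (lines : List Int) (total_dim : Int) (target_count : Int), Dom_interpolate_lines_py lines total_dim target_count → Spec_interpolate_lines_py lines total_dim target_count (interpolate_lines_py lines total_dim target_count)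

-- ===== LEMMAS AND PROOFS =====

-- lexicographic ≤ on Int pairs (Python's tuple order)
def pvLexLe (a b : Int × Int) : Prop := a.1 < b.1 ∨ (a.1 = b.1 ∧ a.2 ≤ b.2)

-- the comparator sorted2 … true uses
def pvBef (a b : Int × Int) : Bool :=
  decide (b.1 < a.1) || (!decide (a.1 < b.1) && decide (b.2 < a.2))

-- the comparator sorted2 … false uses
def pvBefF (a b : Int × Int) : Bool :=
  decide (a.1 < b.1) || (!decide (b.1 < a.1) && decide (a.2 < b.2))

lemma pv_sorted2_eq (xs : List (Int × Int)) :
    PySem.List.sorted2 xs Prod.fst Prod.snd true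
      = xs.foldl (fun acc x => PySem.List.insertBy pvBef x acc) [] := rfl

lemma pv_sorted2F_eq (xs : List (Int × Int)) :
    PySem.List.sorted2 xs Prod.fst Prod.snd false
      = xs.foldl (fun acc x => PySem.List.insertBy pvBefF x acc) [] := rfl

def pvHeadMax (l : List (Int × Int)) : Prop :=
  ∀ m t, l = m :: t → ∀ y ∈ l, pvLexLe y m

lemma pv_bef_true {x a : Int × Int} (h : pvBef x a = true) : pvLexLe a x := by
  unfold pvBef at h; unfold pvLexLe
  simp only [Bool.or_eq_true, Bool.and_eq_true, Bool.not_eq_eq_eq_not, Bool.not_true,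
    decide_eq_true_eq, decide_eq_false_iff_not] at h
  omega

lemma pv_bef_false {x a : Int × Int} (h : pvBef x a = false) : pvLexLe x a := by
  unfold pvBef at h; unfold pvLexLe
  simp only [Bool.or_eq_false_iff, Bool.and_eq_false_iff, Bool.not_eq_eq_eq_not, Bool.not_false,
    decide_eq_false_iff_not, decide_eq_true_eq] at h
  omega

lemma pv_befF_true {x a : Int × Int} (h : pvBefF x a = true) : pvLexLe x a := by
  unfold pvBefF at h; unfold pvLexLe
  simp only [Bool.or_eq_true, Bool.and_eq_true, Bool.not_eq_eq_eq_not, Bool.not_true,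
    decide_eq_true_eq, decide_eq_false_iff_not] at h
  omega

lemma pv_befF_false {x a : Int × Int} (h : pvBefF x a = false) : pvLexLe a x := by
  unfold pvBefF at h; unfold pvLexLe
  simp only [Bool.or_eq_false_iff, Bool.and_eq_false_iff, Bool.not_eq_eq_eq_not, Bool.not_false,
    decide_eq_false_iff_not, decide_eq_true_eq] at h
  omega

lemma pv_lexLe_trans {a b c : Int × Int} (h1 : pvLexLe a b) (h2 : pvLexLe b c) : pvLexLe a c := by
  unfold pvLexLe at *; omega

lemma pv_insertBy_headMax (x : Int × Int) (acc : List (Int × Int)) (h : pvHeadMax acc) :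
    pvHeadMax (PySem.List.insertBy pvBef x acc) := by
  cases acc with
  | nil =>
    intro m t hmt y hy
    simp only [PySem.List.insertBy] at hmt hy
    cases hmt
    simp only [List.mem_singleton] at hy
    subst hy; exact Or.inr ⟨rfl, le_rfl⟩
  | cons a as =>
    intro m t hmt y hy
    simp only [PySem.List.insertBy] at hmt hy
    by_cases hb : pvBef x a = true
    · rw [if_pos hb] at hmt hy
      cases hmt
      rcases List.mem_cons.mp hy with h1 | h1
      · subst h1; exact Or.inr ⟨rfl, le_rfl⟩
      rcases List.mem_cons.mp h1 with h2 | h2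
      · subst h2; exact pv_bef_true hb
      · exact pv_lexLe_trans (h a as rfl y (List.mem_cons_of_mem _ h2)) (pv_bef_true hb)
    · rw [if_neg hb] at hmt hy
      cases hmt
      rcases List.mem_cons.mp hy with h1 | h1
      · subst h1; exact Or.inr ⟨rfl, le_rfl⟩
      rcases (PySem.List.mem_insertBy pvBef x y as).mp h1 with h2 | h2
      · subst h2; exact pv_bef_false (Bool.eq_false_iff.mpr hb)
      · exact h a as rfl y (List.mem_cons_of_mem _ h2)

lemma pv_foldl_headMax (xs : List (Int × Int)) :
    ∀ acc, pvHeadMax acc → pvHeadMax (xs.foldl (fun acc x => PySem.List.insertBy pvBef x acc) acc) := by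
  induction xs with
  | nil => intro acc h; exact h
  | cons x xs ih =>
    intro acc h
    exact ih _ (pv_insertBy_headMax x acc h)

-- head of A's reverse-sorted gap list is a lex maximum of the gaps
lemma pv_sorted2_head_max (xs : List (Int × Int)) (m : Int × Int) (t : List (Int × Int))
    (h : PySem.List.sorted2 xs Prod.fst Prod.snd true = m :: t) : ∀ y ∈ xs, pvLexLe y m := by
  intro y hy
  have hmem : y ∈ PySem.List.sorted2 xs Prod.fst Prod.snd true :=
    (PySem.List.sorted2_perm xs Prod.fst Prod.snd true).mem_iff.mpr hy
  have hmax : pvHeadMax (PySem.List.sorted2 xs Prod.fst Prod.snd true) := by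
    rw [pv_sorted2_eq]
    exact pv_foldl_headMax xs [] (by intro m t h; cases h)
  exact hmax m t h y hmem

-- the ascending sorted2 produces a lexicographically nondecreasing list
lemma pv_insertBy_pairwise (x : Int × Int) (acc : List (Int × Int))
    (h : acc.Pairwise pvLexLe) : (PySem.List.insertBy pvBefF x acc).Pairwise pvLexLe := by
  induction acc with
  | nil => simp [PySem.List.insertBy]
  | cons a as ih =>
    have ha := (List.pairwise_cons.mp h).1
    have has := (List.pairwise_cons.mp h).2
    simp only [PySem.List.insertBy]
    by_cases hb : pvBefF x a = true
    · rw [if_pos hb]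
      refine List.pairwise_cons.mpr ⟨?_, h⟩
      intro y hy
      rcases List.mem_cons.mp hy with h1 | h1
      · subst h1; exact pv_befF_true hb
      · exact pv_lexLe_trans (pv_befF_true hb) (ha y h1)
    · rw [if_neg hb]
      refine List.pairwise_cons.mpr ⟨?_, ih has⟩
      intro y hy
      rcases (PySem.List.mem_insertBy pvBefF x y as).mp hy with h1 | h1
      · subst h1; exact pv_befF_false (Bool.eq_false_iff.mpr hb)
      · exact ha y h1

lemma pv_sorted2F_pairwise (xs : List (Int × Int)) :
    (PySem.List.sorted2 xs Prod.fst Prod.snd false).Pairwise pvLexLe := by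
  rw [pv_sorted2F_eq]
  have : ∀ acc : List (Int × Int), acc.Pairwise pvLexLe →
      (xs.foldl (fun acc x => PySem.List.insertBy pvBefF x acc) acc).Pairwise pvLexLe := by
    induction xs with
    | nil => intro acc h; exact h
    | cons x xs ih => intro acc h; exact ih _ (pv_insertBy_pairwise x acc h)
  exact this [] (by simp)

-- insSorted: a permutation-adding, order-preserving insert
lemma pv_insSorted_perm (l : List (Int × Int)) (item : Int × Int) :
    (insSorted l item).Perm (item :: l) := by
  induction l with
  | nil => simp [insSorted]
  | cons x xs ih =>
    simp only [insSorted]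
    split_ifs with h
    · exact (ih.cons x).trans (List.Perm.swap item x xs)
    · exact List.Perm.refl _

lemma pv_insSorted_pairwise (l : List (Int × Int)) (item : Int × Int)
    (h : l.Pairwise pvLexLe) : (insSorted l item).Pairwise pvLexLe := by
  induction l with
  | nil => simp [insSorted]
  | cons x xs ih =>
    have hx := (List.pairwise_cons.mp h).1
    have hxs := (List.pairwise_cons.mp h).2
    simp only [insSorted]
    split_ifs with hb
    · refine List.pairwise_cons.mpr ⟨?_, ih hxs⟩
      intro y hy
      rcases List.mem_cons.mp ((pv_insSorted_perm xs item).mem_iff.mp hy) with h1 | h1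
      · subst h1
        exact Or.imp_right (fun h2 => ⟨h2.1, le_of_lt h2.2⟩) hb
      · exact hx y h1
    · refine List.pairwise_cons.mpr ⟨?_, h⟩
      intro y hy
      have hle : pvLexLe item x := by unfold pvLexLe; omega
      rcases List.mem_cons.mp hy with h1 | h1
      · subst h1; exact hle
      · exact pv_lexLe_trans hle (hx y h1)

-- adjacent (negated-key) gap list of a point list
def pvGpA : List Int → List (Int × Int)
  | a :: b :: t => (-(b - a), -a) :: pvGpA (b :: t)
  | _ => []

lemma pv_gpA_eq (pts : List Int) :
    pvGpA pts
      = (List.range (pts.length - 1)).map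
          (fun k => (-(pts.getD (k + 1) 0 - pts.getD k 0), -(pts.getD k 0))) := by
  induction pts with
  | nil => rfl
  | cons a t ih =>
    cases t with
    | nil => rfl
    | cons b t2 =>
      simp only [pvGpA, ih, List.length_cons]
      have h1 : t2.length + 1 + 1 - 1 = t2.length + 1 := rfl
      have h2 : t2.length + 1 - 1 = t2.length := rfl
      rw [h1, h2, List.range_succ_eq_map, List.map_cons, List.map_map]
      simp [Function.comp]

lemma pv_gpA_append_cons (pre : List Int) (a : Int) (rest : List Int) :
    pvGpA (pre ++ a :: rest) = pvGpA (pre ++ [a]) ++ pvGpA (a :: rest) := by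
  induction pre with
  | nil => simp [pvGpA]
  | cons x pre ih =>
    cases pre with
    | nil => simp [pvGpA]
    | cons y pre2 =>
      simp only [List.cons_append, pvGpA]
      rw [← List.cons_append, ← List.cons_append]
      rw [show (y :: pre2) ++ a :: rest = (y :: pre2) ++ a :: rest from rfl]
      simp only [List.cons_append] at ih ⊢
      rw [ih]

-- A's gap list in index form
lemma pv_aGaps_eq (pts : List Int) :
    aGaps pts
      = (List.range (pts.length - 1)).map
          (fun k => (pts.getD (k + 1) 0 - pts.getD k 0, (k : Int))) := by
  unfold aGaps
  rw [PySem.List.pyRange_one]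
  have h1 : ((PySem.List.len pts - 1) - 0).toNat = pts.length - 1 := by
    simp [PySem.List.len_eq]
  rw [h1, List.map_map]
  apply List.map_congr_left
  intro k _
  simp only [Function.comp, zero_add, Prod.mk.injEq]
  have h2 : ((k : Int) + 1) = ((k + 1 : Nat) : Int) := by push_cast; ring
  rw [h2, PySem.List.pyGetD_natCast, PySem.List.pyGetD_natCast]
  exact ⟨rfl, trivial⟩

-- B's initial gap list sorts exactly the adjacent gap list
lemma pv_bGaps0_eq (pts : List Int) :
    bGaps0 pts = PySem.List.sorted2 (pvGpA pts) Prod.fst Prod.snd false := by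
  unfold bGaps0
  congr 1
  rw [pv_gpA_eq, PySem.List.pyRange_one]
  have h1 : ((PySem.List.len pts - 1) - 0).toNat = pts.length - 1 := by
    simp [PySem.List.len_eq]
  rw [h1, List.map_map]
  apply List.map_congr_left
  intro k _
  simp only [Function.comp, zero_add, Prod.mk.injEq]
  have h2 : ((k : Int) + 1) = ((k + 1 : Nat) : Int) := by push_cast; ring
  rw [h2, PySem.List.pyGetD_natCast, PySem.List.pyGetD_natCast]
  exact ⟨rfl, rfl⟩

-- strictly sorted lists are strictly increasing in getD
lemma pv_getD_lt (pts : List Int) (hp : pts.Pairwise (· < ·)) {i j : Nat}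
    (hij : i < j) (hj : j < pts.length) : pts.getD i 0 < pts.getD j 0 := by
  rw [List.getD_eq_getElem _ _ (by omega), List.getD_eq_getElem _ _ hj]
  exact List.pairwise_iff_getElem.mp hp i j (by omega) hj hij

-- inserting l < mid < r keeps strict sortedness
lemma pv_pairwise_mid {pre suf : List Int} {l mid r : Int}
    (h : (pre ++ l :: r :: suf).Pairwise (· < ·)) (h1 : l < mid) (h2 : mid < r) :
    (pre ++ l :: mid :: r :: suf).Pairwise (· < ·) := by
  simp only [List.pairwise_append, List.pairwise_cons, List.mem_cons] at h ⊢
  obtain ⟨hpre, ⟨hl, hr, hsuf⟩, hcross⟩ := h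
  refine ⟨hpre, ⟨?_, ?_, hr, hsuf⟩, ?_⟩
  · rintro y (rfl | hy)
    · exact h1
    · exact hl y hy
  · rintro y (rfl | hy)
    · exact h2
    · exact lt_trans h2 (hr y hy)
  · rintro x hx y (rfl | rfl | hy)
    · exact hcross x hx y (Or.inl rfl)
    · exact lt_trans (hcross x hx l (Or.inl rfl)) h1
    · exact hcross x hx y (Or.inr hy)

-- the heads of A's descending sort and B's ascending queue pick the same gap
lemma pv_head_match (pts : List Int) (hp : pts.Pairwise (· < ·))
    (g idx : Int) (t : List (Int × Int))
    (hs : PySem.List.sorted2 (aGaps pts) Prod.fst Prod.snd true = (g, idx) :: t)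
    (gaps rest : List (Int × Int)) (h : Int × Int)
    (hperm : gaps.Perm (pvGpA pts)) (hpw : gaps.Pairwise pvLexLe) (hg : gaps = h :: rest) :
    ∃ k : Nat, k + 1 < pts.length ∧ idx = (k : Int) ∧
      g = pts.getD (k + 1) 0 - pts.getD k 0 ∧ h = (-g, -(pts.getD k 0)) := by
  have hmem : (g, idx) ∈ aGaps pts :=
    (PySem.List.sorted2_perm (aGaps pts) Prod.fst Prod.snd true).mem_iff.mp
      (hs ▸ List.mem_cons_self)
  have hmax := pv_sorted2_head_max (aGaps pts) (g, idx) t hs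
  rw [pv_aGaps_eq] at hmem hmax
  obtain ⟨k, hk, hkeq⟩ := List.mem_map.mp hmem
  have hklt : k < pts.length - 1 := List.mem_range.mp hk
  have hgdef : g = pts.getD (k + 1) 0 - pts.getD k 0 := by
    have := congrArg Prod.fst hkeq; simpa using this.symm
  have hidx : idx = (k : Int) := by
    have := congrArg Prod.snd hkeq; simpa using this.symm
  refine ⟨k, by omega, hidx, hgdef, ?_⟩
  -- B's head is some gap entry
  have hhmem : h ∈ pvGpA pts := hperm.mem_iff.mp (hg ▸ List.mem_cons_self)
  rw [pv_gpA_eq] at hhmem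
  obtain ⟨j, hj, hjeq⟩ := List.mem_map.mp hhmem
  have hjlt : j < pts.length - 1 := List.mem_range.mp hj
  -- the k-th entry is in the queue, and the head is lex-≤ it
  have hkmem : (-(pts.getD (k + 1) 0 - pts.getD k 0), -(pts.getD k 0)) ∈ gaps := by
    apply hperm.mem_iff.mpr
    rw [pv_gpA_eq]
    exact List.mem_map.mpr ⟨k, List.mem_range.mpr hklt, rfl⟩
  have hle : pvLexLe h (-(pts.getD (k + 1) 0 - pts.getD k 0), -(pts.getD k 0)) := by
    rw [hg] at hkmem
    rcases List.mem_cons.mp hkmem with h1 | h1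
    · rw [← h1]; exact Or.inr ⟨rfl, le_rfl⟩
    · exact List.rel_of_pairwise_cons (hg ▸ hpw) h1
  -- the j-th gap is lex-≤ A's head in index form
  have hmaxj : pvLexLe (pts.getD (j + 1) 0 - pts.getD j 0, (j : Int)) (g, idx) :=
    hmax _ (List.mem_map.mpr ⟨j, List.mem_range.mpr hjlt, rfl⟩)
  -- conclude j = k
  have hjk : j = k := by
    rcases Nat.lt_trichotomy j k with hc | hc | hc
    · have hP : pts.getD j 0 < pts.getD k 0 := pv_getD_lt pts hp hc (by omega)
      rw [← hjeq] at hle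
      unfold pvLexLe at hle hmaxj
      simp only at hle hmaxj
      rw [hgdef, hidx] at hmaxj
      have hcz : (j : Int) < (k : Int) := by exact_mod_cast hc
      omega
    · exact hc
    · have hP : pts.getD k 0 < pts.getD j 0 := pv_getD_lt pts hp hc (by omega)
      rw [← hjeq] at hle
      unfold pvLexLe at hle hmaxj
      simp only at hle hmaxj
      rw [hgdef, hidx] at hmaxj
      have hcz : (k : Int) < (j : Int) := by exact_mod_cast hc
      omega
  rw [← hjeq, hjk, hgdef]

-- the main loop correspondence
lemma pv_loop_eq (target : Int) (pts0 : List Int) :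
    ∀ (fuel : Nat) (pts mids : List Int) (gaps : List (Int × Int)),
      (target - ((pts0.length : Int) + mids.length)).toNat ≤ fuel →
      pts.Pairwise (· < ·) →
      pts = PySem.List.sorted (pts0 ++ mids) (fun x => x) →
      gaps.Pairwise pvLexLe →
      gaps.Perm (pvGpA pts) →
      aLoop target pts
        = PySem.List.sorted (pts0 ++ bLoop target (PySem.List.len pts0) mids gaps) (fun x => x) := by
  intro fuel
  induction fuel with
  | zero =>
    intro pts mids gaps hfuel hp hI2 hpw hperm
    have hlen : pts.length = pts0.length + mids.length := by
      rw [hI2]; simp [PySem.List.length_sorted]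
    have hgeA : ¬ (PySem.List.len pts < target) := by
      simp only [PySem.List.len_eq]; omega
    have hgeB : ¬ (PySem.List.len pts0 + PySem.List.len mids < target) := by
      simp only [PySem.List.len_eq]; omega
    rw [aLoop, if_neg hgeA, bLoop.eq_def, if_neg hgeB]
    exact hI2
  | succ n ih =>
    intro pts mids gaps hfuel hp hI2 hpw hperm
    have hlen : pts.length = pts0.length + mids.length := by
      rw [hI2]; simp [PySem.List.length_sorted]
    by_cases hlt : PySem.List.len pts < target
    case neg =>
      have hgeB : ¬ (PySem.List.len pts0 + PySem.List.len mids < target) := by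
        simp only [PySem.List.len_eq] at *; omega
      rw [aLoop, if_neg hlt, bLoop.eq_def, if_neg hgeB]
      exact hI2
    have hltB : PySem.List.len pts0 + PySem.List.len mids < target := by
      simp only [PySem.List.len_eq] at *; omega
    have hlenGpA : (pvGpA pts).length = pts.length - 1 := by
      rw [pv_gpA_eq]; simp
    cases hgaps : gaps with
    | nil =>
      have hgnil : pvGpA pts = [] := ((hgaps ▸ hperm).symm).eq_nil
      have hlen1 : pts.length - 1 = 0 := by rw [← hlenGpA, hgnil]; rfl
      have haG : aGaps pts = [] := by
        rw [pv_aGaps_eq, hlen1]; rfl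
      rw [aLoop, if_pos hlt, haG, bLoop.eq_def, if_pos hltB]
      exact hI2
    | cons hd rest =>
      obtain ⟨ng, nl⟩ := hd
      -- A's sorted gap list is nonempty
      have hlenS : (PySem.List.sorted2 (aGaps pts) Prod.fst Prod.snd true).length
          = pts.length - 1 := by
        rw [(PySem.List.sorted2_perm (aGaps pts) Prod.fst Prod.snd true).length_eq,
          pv_aGaps_eq, List.length_map, List.length_range]
      have hpos : 0 < pts.length - 1 := by
        rw [← hlenGpA, ← hperm.length_eq, hgaps]; simp
      obtain ⟨⟨g, idx⟩, t, hs⟩ : ∃ m t,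
          PySem.List.sorted2 (aGaps pts) Prod.fst Prod.snd true = m :: t := by
        cases hsort : PySem.List.sorted2 (aGaps pts) Prod.fst Prod.snd true with
        | nil => rw [hsort] at hlenS; simp at hlenS; omega
        | cons m t => exact ⟨m, t, rfl⟩
      obtain ⟨k, hk, hidx, hgdef, hh⟩ :=
        pv_head_match pts hp g idx t hs gaps rest (ng, nl) hperm hpw hgaps
      have hng : ng = -g := (Prod.mk.injEq _ _ _ _).mp hh |>.1
      have hnl : nl = -(pts.getD k 0) := (Prod.mk.injEq _ _ _ _).mp hh |>.2
      set l := pts.getD k 0 with hldef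
      set r := pts.getD (k + 1) 0 with hrdef
      rw [aLoop, if_pos hlt, hs, bLoop, if_pos hltB]
      simp only [hng, hnl, neg_neg]
      by_cases hbrk : g < 20
      · rw [if_pos hbrk, if_pos hbrk]
        exact hI2
      · rw [if_neg hbrk, if_neg hbrk]
        -- the two midpoints agree
        have hlr : l + g = r := by rw [hgdef]; ring
        set mid := PySem.Int.floordiv (l + r) 2 with hmiddef
        have hAarg : PySem.Int.floordiv
            (PySem.List.pyGetD pts idx 0 + PySem.List.pyGetD pts (idx + 1) 0) 2 = mid := by
          rw [hidx]
          have h1 : (k : Int) + 1 = ((k + 1 : Nat) : Int) := by push_cast; ring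
          rw [h1, PySem.List.pyGetD_natCast, PySem.List.pyGetD_natCast]
        have hBarg : PySem.Int.floordiv (l + (l + g)) 2 = mid := by rw [hlr]
        -- l < mid < r
        have hlo : l < mid := by
          have h20 : l + 20 ≤ r := by omega
          have := (PySem.Int.le_floordiv_iff_mul_le (a := l + r) (b := 2)
            (q := l + 1) (by omega)).mpr (by omega)
          omega
        have hhi : mid < r := by
          have hlt2 : l < r := by omega
          exact (PySem.Int.floordiv_lt_iff_lt_mul (a := l + r) (b := 2)
            (q := r) (by omega)).mpr (by omega)
        -- decompose pts around the chosen gap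
        set pre := pts.take k with hpredef
        set suf := pts.drop (k + 2) with hsufdef
        have hdec : pts = pre ++ l :: r :: suf := by
          have hd1 : pts.drop k = pts[k] :: pts.drop (k + 1) :=
            List.drop_eq_getElem_cons (by omega)
          have hd2 : pts.drop (k + 1) = pts[k + 1] :: pts.drop (k + 2) :=
            List.drop_eq_getElem_cons (by omega)
          have hl1 : l = pts[k] := List.getD_eq_getElem pts 0 (by omega)
          have hr1 : r = pts[k + 1] := List.getD_eq_getElem pts 0 (by omega)
          conv_lhs => rw [← List.take_append_drop k pts]
          rw [hd1, hd2, hl1, hr1]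
        set pts' := pre ++ l :: mid :: r :: suf with hpts'def
        have hp' : pts'.Pairwise (· < ·) := pv_pairwise_mid (hdec ▸ hp) hlo hhi
        -- A's appended-and-resorted list is pts'
        have hpermMid : pts'.Perm (pts ++ [mid]) := by
          have e1 : pts' = (pre ++ [l]) ++ mid :: (r :: suf) := by simp [hpts'def]
          have e2 : (pre ++ [l]) ++ r :: suf = pts := by rw [hdec]; simp
          have s1 : List.Perm ((pre ++ [l]) ++ mid :: (r :: suf))
              (mid :: ((pre ++ [l]) ++ r :: suf)) := List.perm_middle
          rw [e2] at s1
          rw [e1]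
          exact s1.trans (List.perm_append_singleton mid pts).symm
        have hsortedA : PySem.List.sorted (pts ++ [mid]) (fun x => x) = pts' :=
          PySem.List.sorted_eq_of_perm_of_pairwise_lt _ _ _ hpermMid hp'
        -- invariant I2 for the next step
        have hI2' : pts' = PySem.List.sorted (pts0 ++ (mids ++ [mid])) (fun x => x) := by
          have hppp : pts.Perm (pts0 ++ mids) := by
            rw [hI2]; exact PySem.List.sorted_perm _ _ _
          have q1 : pts'.Perm ((pts0 ++ mids) ++ [mid]) :=
            hpermMid.trans (hppp.append_right [mid])
          have q2 : pts'.Perm (pts0 ++ (mids ++ [mid])) := by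
            rw [← List.append_assoc]; exact q1
          exact (PySem.List.sorted_eq_of_perm_of_pairwise_lt _ _ _ q2 hp').symm
        -- gap bookkeeping
        set n1 : Int × Int := (-(mid - l), -l) with hn1def
        set n2 : Int × Int := (-(r - mid), -mid) with hn2def
        set gpPre := pvGpA (pre ++ [l]) with hgpPredef
        set gpSuf := pvGpA (r :: suf) with hgpSufdef
        have hGpts : pvGpA pts = gpPre ++ (-g, -l) :: gpSuf := by
          have hgg : ((-g, -l) : Int × Int) = (-(r - l), -l) := by rw [hgdef]
          rw [hdec, pv_gpA_append_cons, hgg]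
          rfl
        have hGpts' : pvGpA pts' = gpPre ++ n1 :: n2 :: gpSuf := by
          rw [hpts'def, pv_gpA_append_cons]
          rfl
        have hrest : rest.Perm (gpPre ++ gpSuf) := by
          have h1 : ((-g, -l) :: rest).Perm (gpPre ++ (-g, -l) :: gpSuf) := by
            rw [← hGpts]
            have := hgaps ▸ hperm
            simpa [hng, hnl] using this
          have h2 : (gpPre ++ (-g, -l) :: gpSuf).Perm ((-g, -l) :: (gpPre ++ gpSuf)) :=
            List.perm_middle
          exact (h1.trans h2).cons_inv
        have hrestpw : rest.Pairwise pvLexLe := (List.pairwise_cons.mp (hgaps ▸ hpw)).2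
        have hpw' : (insSorted (insSorted rest n1) n2).Pairwise pvLexLe :=
          pv_insSorted_pairwise _ _ (pv_insSorted_pairwise _ _ hrestpw)
        have hperm' : (insSorted (insSorted rest n1) n2).Perm (pvGpA pts') := by
          have c1 := pv_insSorted_perm (insSorted rest n1) n2
          have c2 := (pv_insSorted_perm rest n1).cons n2
          have c3 : List.Perm (n2 :: n1 :: rest) (n1 :: n2 :: rest) := List.Perm.swap n1 n2 rest
          have c4 := (hrest.cons n2).cons n1
          have c5 : List.Perm (n1 :: n2 :: (gpPre ++ gpSuf)) (n1 :: (gpPre ++ n2 :: gpSuf)) :=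
            (List.perm_middle.symm).cons n1
          have c6 : List.Perm (n1 :: (gpPre ++ n2 :: gpSuf)) (gpPre ++ n1 :: n2 :: gpSuf) :=
            List.perm_middle.symm
          rw [hGpts']
          exact ((((c1.trans c2).trans c3).trans c4).trans c5).trans c6
        -- fuel
        have hfuel' : (target - ((pts0.length : Int) + (mids ++ [mid]).length)).toNat ≤ n := by
          simp only [List.length_append, List.length_cons, List.length_nil] at *
          simp only [PySem.List.len_eq] at hltB
          push_cast at *
          omega
        -- rewrite both recursive arguments and close with the IH
        rw [hAarg, hBarg, hsortedA]
        have hB3 : (-(l + g - mid), -mid) = n2 := by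
          rw [hn2def]
          have : l + g - mid = r - mid := by omega
          rw [this]
        rw [hB3]
        exact ih pts' (mids ++ [mid]) _ hfuel' hp' hI2' hpw' hperm' 

-- ===== VERDICT (by name: the statement is the Claim_ definition above) =====
theorem interpolate_lines_py_spec : Claim_equal_interpolate_lines_py := by
  intro lines total_dim target_count _
  unfold Spec_interpolate_lines_py interpolate_lines_py interpolate_lines_py_alt
  have hp : (PySem.List.sorted (PySem.Set.ofList lines) (fun x => x)).Pairwise (· < ·) :=
    PySem.List.sorted_ofList_pairwise_lt lines
  set pts0 := PySem.List.sorted (PySem.Set.ofList lines) (fun x => x) with hpts0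
  have h2 : pts0 = PySem.List.sorted (pts0 ++ []) (fun x => x) := by
    rw [List.append_nil]
    exact (PySem.List.sorted_eq_self_of_pairwise _ _ (hp.imp le_of_lt)).symm
  have h4 : (bGaps0 pts0).Pairwise pvLexLe := by
    rw [pv_bGaps0_eq]; exact pv_sorted2F_pairwise _
  have h5 : (bGaps0 pts0).Perm (pvGpA pts0) := by
    rw [pv_bGaps0_eq]; exact PySem.List.sorted2_perm _ _ _ _
  exact pv_loop_eq target_count pts0 _ pts0 [] (bGaps0 pts0) le_rfl hp h2 h4 h5
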